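-- pv_equiv track=rewrite | github.com/kainoj/ai | es02/ex4.py | stripBoard
-- ===== SOURCE A (Python) =====
-- GOAL = 'G'
--
-- START = 'S'
--
-- GOST = 'B'      # Both goal and start
--
-- def stripBoard(board):
--     """
--     Return values:
--         board : [[]]        a board with '.' and '#' only
--         goals : set()       a set of tuples of goals
--         starts : set()      a set of tuples of start fields
--     """
--     starts = []
--     goals = []
--     for i in range(len(board)):
--         for j in range(len(board[0])):
--             if board[i][j] == GOAL:
--                 goals.append((i, j))
--                 board[i][j] = ' '
--             if board[i][j] == START:
--                 starts.append((i, j))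
--                 board[i][j] = ' '
--             if board[i][j] == GOST:
--                 starts.append((i, j))
--                 goals.append((i, j))
--                 board[i][j] = ' '
--     return board, set(goals), set(starts)
-- ===== SOURCE B (Python) =====
-- def stripBoard(board):
--     rows = len(board)
--     cols = len(board[0]) if board else 0
--     goals = [(i, j) for i in range(rows) for j in range(cols)
--              if board[i][j] in ('G', 'B')]
--     starts = [(i, j) for i in range(rows) for j in range(cols)
--               if board[i][j] in ('S', 'B')]
--     for i in range(rows):
--         for j in range(cols):
--             if board[i][j] in ('G', 'S', 'B'):
--                 board[i][j] = ' '
--     return board, set(goals), set(starts)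
-- ===== Notes on version B (the rewrite author's own statement) =====
-- stated objective: simpler
-- what changed: A's single interleaved scan that classifies each cell and blanks it in the same pass (with re-reads after each mutation) is replaced by three separate plain passes: one comprehension collecting goal cells, one collecting start cells, then a loop blanking every marker cell.
import Mathlib
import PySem

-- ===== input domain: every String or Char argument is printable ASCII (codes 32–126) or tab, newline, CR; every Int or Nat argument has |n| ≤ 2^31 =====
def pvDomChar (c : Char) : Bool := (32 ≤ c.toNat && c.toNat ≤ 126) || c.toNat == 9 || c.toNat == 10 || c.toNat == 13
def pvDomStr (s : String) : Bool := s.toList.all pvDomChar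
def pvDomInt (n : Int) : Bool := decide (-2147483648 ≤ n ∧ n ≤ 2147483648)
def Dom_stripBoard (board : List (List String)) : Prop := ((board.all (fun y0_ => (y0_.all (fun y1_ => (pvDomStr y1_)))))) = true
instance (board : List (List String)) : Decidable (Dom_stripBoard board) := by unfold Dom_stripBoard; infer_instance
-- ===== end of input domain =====

-- B replaces A's single interleaved classify-and-mutate scan by three separate passes
-- (collect goals, collect starts, then blank); equivalence is about the RETURN value —
-- both Pythons also mutate `board` in place, and inside Pre_ their mutations coincide.

-- ===== PORT A =====
def stripBoard (board : List (List String)) : List (List String) × (List (Int × Int)) × (List (Int × Int)) :=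
  let st :=
    (PySem.List.pyRange 0 (board.length : Int) 1).foldl
      (fun st i =>
        (PySem.List.pyRange 0 ((PySem.List.pyGetD st.1 0 []).length : Int) 1).foldl
          (fun st j =>
            let b := st.1
            let gs := st.2.1
            let ss := st.2.2
            let p1 :=
              if PySem.List.pyGetD (PySem.List.pyGetD b i []) j "" = "G" then
                (PySem.List.pySetD b i (PySem.List.pySetD (PySem.List.pyGetD b i []) j " "),
                 gs ++ [(i, j)])
              else (b, gs)
            let p2 :=
              if PySem.List.pyGetD (PySem.List.pyGetD p1.1 i []) j "" = "S" then
                (PySem.List.pySetD p1.1 i (PySem.List.pySetD (PySem.List.pyGetD p1.1 i []) j " "),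
                 ss ++ [(i, j)])
              else (p1.1, ss)
            let p3 :=
              if PySem.List.pyGetD (PySem.List.pyGetD p2.1 i []) j "" = "B" then
                (PySem.List.pySetD p2.1 i (PySem.List.pySetD (PySem.List.pyGetD p2.1 i []) j " "),
                 p1.2 ++ [(i, j)], p2.2 ++ [(i, j)])
              else (p2.1, p1.2, p2.2)
            (p3.1, p3.2.1, p3.2.2))
          st)
      (board, ([] : List (Int × Int)), ([] : List (Int × Int)))
  (st.1, PySem.Set.ofList st.2.1, PySem.Set.ofList st.2.2)

-- ===== PORT B =====
def stripBoard_alt (board : List (List String)) : List (List String) × (List (Int × Int)) × (List (Int × Int)) :=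
  let rows : Int := board.length
  let cols : Int := if board.isEmpty then 0 else ((board.headD []).length : Int)
  let goals :=
    (PySem.List.pyRange 0 rows 1).flatMap (fun i =>
      ((PySem.List.pyRange 0 cols 1).filter (fun j =>
          let c := PySem.List.pyGetD (PySem.List.pyGetD board i []) j ""
          c == "G" || c == "B")).map (fun j => (i, j)))
  let starts :=
    (PySem.List.pyRange 0 rows 1).flatMap (fun i =>
      ((PySem.List.pyRange 0 cols 1).filter (fun j =>
          let c := PySem.List.pyGetD (PySem.List.pyGetD board i []) j ""
          c == "S" || c == "B")).map (fun j => (i, j)))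
  let board' :=
    (PySem.List.pyRange 0 rows 1).foldl (fun b i =>
      (PySem.List.pyRange 0 cols 1).foldl (fun b j =>
        let c := PySem.List.pyGetD (PySem.List.pyGetD b i []) j ""
        if c == "G" || c == "S" || c == "B" then
          PySem.List.pySetD b i (PySem.List.pySetD (PySem.List.pyGetD b i []) j " ")
        else b) b) board
  (board', PySem.Set.ofList goals, PySem.Set.ofList starts)

-- ===== PRECONDITION & SPEC =====
-- Pre_ excludes exactly the ragged boards on which Python A raises IndexError
-- (some row shorter than row 0, so board[i][j] with j < len(board[0]) is out of range).
def Pre_stripBoard (board : List (List String)) : Prop :=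
  ∀ r ∈ board, (board.headD []).length ≤ r.length
instance (board : List (List String)) : Decidable (Pre_stripBoard board) := by unfold Pre_stripBoard; infer_instance

def pvWitness_stripBoard : List (List String) := [["G", "S", "."], ["B", "#", "x"]]

def Spec_stripBoard (board : List (List String)) (out : List (List String) × (List (Int × Int)) × (List (Int × Int))) : Prop := out = stripBoard_alt board
instance (board : List (List String)) (out : List (List String) × (List (Int × Int)) × (List (Int × Int))) : Decidable (Spec_stripBoard board out) := by unfold Spec_stripBoard; infer_instance

-- ===== CLAIM (what is proved, stated in full; the proofs are below) =====
def Claim_equal_stripBoard : Prop := ∀ (board : List (List String)), Dom_stripBoard board → Pre_stripBoard board → Spec_stripBoard board (stripBoard board)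

-- ===== LEMMAS AND PROOFS =====
def btest (c : String) : Bool := c == "G" || c == "S" || c == "B"
def cellOf (r : List String) (j : Int) : String := PySem.List.pyGetD r j ""
def rowOf (b : List (List String)) (i : Int) : List String := PySem.List.pyGetD b i []
def rowSel (t : String → Bool) (i : Int) (r : List String) (a m : Int) : List (Int × Int) :=
  ((PySem.List.pyRange a m 1).filter (fun j => t (cellOf r j))).map (fun j => (i, j))
def blankRow (r : List String) (a m : Int) : List String :=
  (PySem.List.pyRange a m 1).foldl
    (fun r j => if btest (cellOf r j) then PySem.List.pySetD r j " " else r) r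

theorem foldl_blank_length (l : List Int) : ∀ r : List String,
    (l.foldl (fun r j => if btest (cellOf r j) then PySem.List.pySetD r j " " else r) r).length = r.length := by
  induction l with
  | nil => intro r; rfl
  | cons x t ih =>
    intro r
    rw [List.foldl_cons]
    by_cases h : btest (cellOf r x) <;> simp [h, ih]

theorem length_blankRow (r : List String) (a m : Int) : (blankRow r a m).length = r.length :=
  foldl_blank_length _ r

theorem blankRow_cons (r : List String) (a m : Int) (h : a < m) :
    blankRow r a m = blankRow (if btest (cellOf r a) then PySem.List.pySetD r a " " else r) (a + 1) m := by
  simp only [blankRow, PySem.List.pyRange_one_cons h, List.foldl_cons]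

theorem blankRow_nil (r : List String) (m : Int) : blankRow r m m = r := by
  simp [blankRow, PySem.List.pyRange_one_eq_nil (le_refl m)]

theorem rowSel_congr (t : String → Bool) (i : Int) (r r' : List String) (a m : Int)
    (h : ∀ j, a ≤ j → j < m → cellOf r j = cellOf r' j) :
    rowSel t i r a m = rowSel t i r' a m := by
  unfold rowSel
  congr 1
  apply List.filter_congr
  intro j hj
  rw [PySem.List.mem_pyRange_one] at hj
  rw [h j hj.1 hj.2]

theorem rowSel_cons (t : String → Bool) (i : Int) (r : List String) (a m : Int) (h : a < m) :
    rowSel t i r a m = (if t (cellOf r a) then [(i, a)] else []) ++ rowSel t i r (a + 1) m := by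
  unfold rowSel
  rw [PySem.List.pyRange_one_cons h, List.filter_cons]
  by_cases ht : t (cellOf r a) <;> simp [ht]

theorem rowSel_nil (t : String → Bool) (i : Int) (r : List String) (m : Int) : rowSel t i r m m = [] := by
  simp [rowSel, PySem.List.pyRange_one_eq_nil (le_refl m)]
theorem pyGetD_pySetD_int {α : Type} (xs : List α) (v d : α) (a j : Int)
    (h0 : 0 ≤ a) (hl : a < (xs.length : Int)) (hj : 0 ≤ j) :
    PySem.List.pyGetD (PySem.List.pySetD xs a v) j d = if j = a then v else PySem.List.pyGetD xs j d := by
  have ha' : a = ((a.toNat : Nat) : Int) := (Int.toNat_of_nonneg h0).symm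
  have hj' : j = ((j.toNat : Nat) : Int) := (Int.toNat_of_nonneg hj).symm
  rw [ha', hj', PySem.List.pyGetD_pySetD_natCast xs a.toNat j.toNat v d (by omega)]
  rcases eq_or_ne j a with h | h
  · rw [if_pos (show j.toNat = a.toNat by omega), if_pos (show ((j.toNat : Nat) : Int) = ((a.toNat : Nat) : Int) by omega)]
  · rw [if_neg (show ¬ j.toNat = a.toNat by omega), if_neg (show ¬ ((j.toNat : Nat) : Int) = ((a.toNat : Nat) : Int) by omega), ← hj']

def gtest (c : String) : Bool := c == "G" || c == "B"
def stest (c : String) : Bool := c == "S" || c == "B"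

def stepA (i : Int) (st : List (List String) × List (Int × Int) × List (Int × Int)) (j : Int) :
    List (List String) × List (Int × Int) × List (Int × Int) :=
  let b := st.1
  let gs := st.2.1
  let ss := st.2.2
  let p1 :=
    if PySem.List.pyGetD (PySem.List.pyGetD b i []) j "" = "G" then
      (PySem.List.pySetD b i (PySem.List.pySetD (PySem.List.pyGetD b i []) j " "), gs ++ [(i, j)])
    else (b, gs)
  let p2 :=
    if PySem.List.pyGetD (PySem.List.pyGetD p1.1 i []) j "" = "S" then
      (PySem.List.pySetD p1.1 i (PySem.List.pySetD (PySem.List.pyGetD p1.1 i []) j " "), ss ++ [(i, j)])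
    else (p1.1, ss)
  let p3 :=
    if PySem.List.pyGetD (PySem.List.pyGetD p2.1 i []) j "" = "B" then
      (PySem.List.pySetD p2.1 i (PySem.List.pySetD (PySem.List.pyGetD p2.1 i []) j " "),
       p1.2 ++ [(i, j)], p2.2 ++ [(i, j)])
    else (p2.1, p1.2, p2.2)
  (p3.1, p3.2.1, p3.2.2)

theorem rowOf_pySetD_self (b : List (List String)) (i : Int) (x : List String)
    (h0 : 0 ≤ i) (hl : i < (b.length : Int)) :
    rowOf (PySem.List.pySetD b i x) i = x := by
  unfold rowOf
  rw [pyGetD_pySetD_int b x [] i i h0 hl h0]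
  simp

theorem stepA_char (i a : Int) (b : List (List String)) (gs ss : List (Int × Int))
    (h0 : 0 ≤ i) (hib : i < (b.length : Int)) (h0a : 0 ≤ a) (ha : a < ((rowOf b i).length : Int)) :
    stepA i (b, gs, ss) a =
      (if btest (cellOf (rowOf b i) a) then PySem.List.pySetD b i (PySem.List.pySetD (rowOf b i) a " ") else b,
       gs ++ (if gtest (cellOf (rowOf b i) a) then [(i, a)] else []),
       ss ++ (if stest (cellOf (rowOf b i) a) then [(i, a)] else [])) := by
  have hblank : ∀ r : List String, a < (r.length : Int) →
      cellOf (PySem.List.pySetD r a " ") a = " " := by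
    intro r hr
    unfold cellOf
    rw [pyGetD_pySetD_int r " " "" a a h0a hr h0a]
    simp
  have hrow : ∀ x : List String, rowOf (PySem.List.pySetD b i x) i = x :=
    fun x => rowOf_pySetD_self b i x h0 hib
  unfold cellOf rowOf at *
  by_cases hG : PySem.List.pyGetD (PySem.List.pyGetD b i []) a "" = "G"
  · have e1 : PySem.List.pyGetD (PySem.List.pyGetD (PySem.List.pySetD b i (PySem.List.pySetD (PySem.List.pyGetD b i []) a " ")) i []) a "" = " " := by
      rw [hrow]; exact hblank _ ha
    simp [stepA, hG, e1, gtest, stest, btest]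
  · by_cases hS : PySem.List.pyGetD (PySem.List.pyGetD b i []) a "" = "S"
    · have e1 : PySem.List.pyGetD (PySem.List.pyGetD (PySem.List.pySetD b i (PySem.List.pySetD (PySem.List.pyGetD b i []) a " ")) i []) a "" = " " := by
        rw [hrow]; exact hblank _ ha
      simp [stepA, hG, hS, e1, gtest, stest, btest]
    · by_cases hB : PySem.List.pyGetD (PySem.List.pyGetD b i []) a "" = "B"
      · simp [stepA, hG, hS, hB, gtest, stest, btest]
      · simp [stepA, hG, hS, hB, gtest, stest, btest]
theorem pySetD_pySetD (b : List (List String)) (i : Int) (x y : List String) (h0 : 0 ≤ i) :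
    PySem.List.pySetD (PySem.List.pySetD b i y) i x = PySem.List.pySetD b i x := by
  rw [PySem.List.pySetD_of_nonneg _ _ h0, PySem.List.pySetD_of_nonneg _ _ h0,
      PySem.List.pySetD_of_nonneg _ _ h0, List.set_set]

theorem cell_congr_set (r : List String) (a j : Int) (h0a : 0 ≤ a) (har : a < (r.length : Int))
    (hj : 0 ≤ j) (hne : j ≠ a) : cellOf (PySem.List.pySetD r a " ") j = cellOf r j := by
  unfold cellOf
  rw [pyGetD_pySetD_int r " " "" a j h0a har hj, if_neg hne]

theorem A_inner (i : Int) (k : Nat) : ∀ (a m : Int) (b : List (List String)) (gs ss : List (Int × Int)),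
    a + (k : Int) = m → 0 ≤ a → 0 ≤ i → i < (b.length : Int) → m ≤ ((rowOf b i).length : Int) →
    (PySem.List.pyRange a m 1).foldl (stepA i) (b, gs, ss) =
      (PySem.List.pySetD b i (blankRow (rowOf b i) a m),
       gs ++ rowSel gtest i (rowOf b i) a m,
       ss ++ rowSel stest i (rowOf b i) a m) := by
  induction k with
  | zero =>
    intro a m b gs ss hk h0a h0 hib hm
    have ham : a = m := by omega
    subst ham
    rw [PySem.List.pyRange_one_eq_nil (le_refl a)]
    simp only [List.foldl_nil, blankRow_nil, rowSel_nil, List.append_nil]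
    rw [PySem.List.pySetD_of_nonneg _ _ h0]
    unfold rowOf
    rw [PySem.List.pyGetD_eq_getElem b [] h0 hib, List.set_getElem_self]
  | succ k ih =>
    intro a m b gs ss hk h0a h0 hib hm
    have ham : a < m := by omega
    have har : a < ((rowOf b i).length : Int) := by omega
    rw [PySem.List.pyRange_one_cons ham, List.foldl_cons, stepA_char i a b gs ss h0 hib h0a har]
    by_cases hb : btest (cellOf (rowOf b i) a)
    · rw [if_pos hb]
      have hrow' : rowOf (PySem.List.pySetD b i (PySem.List.pySetD (rowOf b i) a " ")) i
          = PySem.List.pySetD (rowOf b i) a " " := rowOf_pySetD_self b i _ h0 hib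
      rw [ih (a + 1) m _ _ _ (by omega) (by omega) h0
        (by rw [show (PySem.List.pySetD b i (PySem.List.pySetD (rowOf b i) a " ")).length = b.length from PySem.List.length_pySetD _ _ _]; exact hib)
        (by rw [hrow', show (PySem.List.pySetD (rowOf b i) a " ").length = (rowOf b i).length from PySem.List.length_pySetD _ _ _]; exact hm)]
      rw [hrow', pySetD_pySetD b i _ _ h0]
      rw [blankRow_cons (rowOf b i) a m ham, if_pos hb]
      rw [rowSel_cons gtest i (rowOf b i) a m ham, rowSel_cons stest i (rowOf b i) a m ham]
      rw [rowSel_congr gtest i (rowOf b i) (PySem.List.pySetD (rowOf b i) a " ") (a + 1) m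
            (fun j h1 h2 => (cell_congr_set (rowOf b i) a j h0a har (by omega) (by omega)).symm),
          rowSel_congr stest i (rowOf b i) (PySem.List.pySetD (rowOf b i) a " ") (a + 1) m
            (fun j h1 h2 => (cell_congr_set (rowOf b i) a j h0a har (by omega) (by omega)).symm)]
      simp [List.append_assoc]
    · rw [if_neg hb]
      rw [ih (a + 1) m b _ _ (by omega) (by omega) h0 hib (by omega)]
      rw [blankRow_cons (rowOf b i) a m ham, if_neg hb]
      rw [rowSel_cons gtest i (rowOf b i) a m ham, rowSel_cons stest i (rowOf b i) a m ham]
      simp [List.append_assoc]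
def stepB (i : Int) (b : List (List String)) (j : Int) : List (List String) :=
  let c := PySem.List.pyGetD (PySem.List.pyGetD b i []) j ""
  if c == "G" || c == "S" || c == "B" then
    PySem.List.pySetD b i (PySem.List.pySetD (PySem.List.pyGetD b i []) j " ")
  else b

def blankBoard (b : List (List String)) (a n m : Int) : List (List String) :=
  (PySem.List.pyRange a n 1).foldl
    (fun b i => PySem.List.pySetD b i (blankRow (rowOf b i) 0 m)) b

def selBoard (t : String → Bool) (b : List (List String)) (a n m : Int) : List (Int × Int) :=
  (PySem.List.pyRange a n 1).flatMap (fun i => rowSel t i (rowOf b i) 0 m)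

theorem stepB_char (i : Int) (b : List (List String)) (a : Int) :
    stepB i b a = if btest (cellOf (rowOf b i) a)
      then PySem.List.pySetD b i (PySem.List.pySetD (rowOf b i) a " ") else b := rfl

theorem rowOf_set_ne (b : List (List String)) (x : List String) (a i : Int)
    (h0a : 0 ≤ a) (ha : a < (b.length : Int)) (h0i : 0 ≤ i) (hne : i ≠ a) :
    rowOf (PySem.List.pySetD b a x) i = rowOf b i := by
  unfold rowOf
  rw [pyGetD_pySetD_int b x [] a i h0a ha h0i, if_neg hne]

theorem B_inner (i : Int) (k : Nat) : ∀ (a m : Int) (b : List (List String)),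
    a + (k : Int) = m → 0 ≤ a → 0 ≤ i → i < (b.length : Int) → m ≤ ((rowOf b i).length : Int) →
    (PySem.List.pyRange a m 1).foldl (stepB i) b =
      PySem.List.pySetD b i (blankRow (rowOf b i) a m) := by
  induction k with
  | zero =>
    intro a m b hk h0a h0 hib hm
    have ham : a = m := by omega
    subst ham
    rw [PySem.List.pyRange_one_eq_nil (le_refl a)]
    simp only [List.foldl_nil, blankRow_nil]
    rw [PySem.List.pySetD_of_nonneg _ _ h0]
    unfold rowOf
    rw [PySem.List.pyGetD_eq_getElem b [] h0 hib, List.set_getElem_self]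
  | succ k ih =>
    intro a m b hk h0a h0 hib hm
    have ham : a < m := by omega
    have har : a < ((rowOf b i).length : Int) := by omega
    rw [PySem.List.pyRange_one_cons ham, List.foldl_cons, stepB_char]
    by_cases hb : btest (cellOf (rowOf b i) a)
    · rw [if_pos hb]
      have hrow' : rowOf (PySem.List.pySetD b i (PySem.List.pySetD (rowOf b i) a " ")) i
          = PySem.List.pySetD (rowOf b i) a " " := rowOf_pySetD_self b i _ h0 hib
      rw [ih (a + 1) m _ (by omega) (by omega) h0
        (by rw [show (PySem.List.pySetD b i (PySem.List.pySetD (rowOf b i) a " ")).length = b.length from PySem.List.length_pySetD _ _ _]; exact hib)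
        (by rw [hrow', show (PySem.List.pySetD (rowOf b i) a " ").length = (rowOf b i).length from PySem.List.length_pySetD _ _ _]; exact hm)]
      rw [hrow', pySetD_pySetD b i _ _ h0, blankRow_cons (rowOf b i) a m ham, if_pos hb]
    · rw [if_neg hb]
      rw [ih (a + 1) m b (by omega) (by omega) h0 hib (by omega)]
      rw [blankRow_cons (rowOf b i) a m ham, if_neg hb]

theorem blankBoard_nil (b : List (List String)) (n m : Int) : blankBoard b n n m = b := by
  simp [blankBoard, PySem.List.pyRange_one_eq_nil (le_refl n)]

theorem blankBoard_cons (b : List (List String)) (a n m : Int) (h : a < n) :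
    blankBoard b a n m = blankBoard (PySem.List.pySetD b a (blankRow (rowOf b a) 0 m)) (a + 1) n m := by
  simp only [blankBoard, PySem.List.pyRange_one_cons h, List.foldl_cons]

theorem selBoard_nil (t : String → Bool) (b : List (List String)) (n m : Int) : selBoard t b n n m = [] := by
  simp [selBoard, PySem.List.pyRange_one_eq_nil (le_refl n)]

theorem selBoard_cons (t : String → Bool) (b : List (List String)) (a n m : Int) (h : a < n) :
    selBoard t b a n m = rowSel t a (rowOf b a) 0 m ++ selBoard t b (a + 1) n m := by
  simp only [selBoard, PySem.List.pyRange_one_cons h, List.flatMap_cons]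

theorem selBoard_congr (t : String → Bool) (b b' : List (List String)) (a n m : Int)
    (h : ∀ i, a ≤ i → i < n → rowOf b i = rowOf b' i) :
    selBoard t b a n m = selBoard t b' a n m := by
  unfold selBoard
  apply List.flatMap_congr
  intro i hi
  rw [PySem.List.mem_pyRange_one] at hi
  rw [h i hi.1 hi.2]

def stepOutA (st : List (List String) × List (Int × Int) × List (Int × Int)) (i : Int) :
    List (List String) × List (Int × Int) × List (Int × Int) :=
  (PySem.List.pyRange 0 ((PySem.List.pyGetD st.1 0 []).length : Int) 1).foldl (stepA i) st

theorem A_outer (m : Int) (k : Nat) : ∀ (a n : Int) (b : List (List String)) (gs ss : List (Int × Int)),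
    n = (b.length : Int) → a + (k : Int) = n → 0 ≤ a →
    ((rowOf b 0).length : Int) = m →
    (∀ i, a ≤ i → i < n → m ≤ ((rowOf b i).length : Int)) →
    (PySem.List.pyRange a n 1).foldl stepOutA (b, gs, ss) =
      (blankBoard b a n m, gs ++ selBoard gtest b a n m, ss ++ selBoard stest b a n m) := by
  induction k with
  | zero =>
    intro a n b gs ss hn hk h0a hhead hrows
    have : a = n := by omega
    subst this
    rw [PySem.List.pyRange_one_eq_nil (le_refl a)]
    simp [blankBoard_nil, selBoard_nil]
  | succ k ih =>
    intro a n b gs ss hn hk h0a hhead hrows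
    have ham : a < n := by omega
    have h0m : 0 ≤ m := by rw [← hhead]; positivity
    rw [PySem.List.pyRange_one_cons ham, List.foldl_cons]
    have hstep : stepOutA (b, gs, ss) a =
        (PySem.List.pySetD b a (blankRow (rowOf b a) 0 m),
         gs ++ rowSel gtest a (rowOf b a) 0 m,
         ss ++ rowSel stest a (rowOf b a) 0 m) := by
      show (PySem.List.pyRange 0 ((PySem.List.pyGetD b 0 []).length : Int) 1).foldl (stepA a) (b, gs, ss) = _
      have : ((PySem.List.pyGetD b 0 []).length : Int) = m := hhead
      rw [this]
      exact A_inner a m.toNat 0 m b gs ss (by omega) (by omega) h0a (by omega)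
        (hrows a (le_refl a) ham)
    rw [hstep]
    have hlen : ((PySem.List.pySetD b a (blankRow (rowOf b a) 0 m)).length : Int) = (b.length : Int) := by
      rw [PySem.List.length_pySetD]
    have hab : a < (b.length : Int) := by omega
    have hrowNe : ∀ i, a + 1 ≤ i → i < n →
        rowOf (PySem.List.pySetD b a (blankRow (rowOf b a) 0 m)) i = rowOf b i := by
      intro i hi1 hi2
      exact rowOf_set_ne b _ a i h0a hab (by omega) (by omega)
    have hhead' : ((rowOf (PySem.List.pySetD b a (blankRow (rowOf b a) 0 m)) 0).length : Int) = m := by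
      rcases eq_or_lt_of_le h0a with h0a' | h0a'
      · subst h0a'
        rw [rowOf_pySetD_self b 0 _ (le_refl 0) hab]
        rw [show (blankRow (rowOf b 0) 0 m).length = (rowOf b 0).length from length_blankRow _ _ _]
        exact hhead
      · rw [rowOf_set_ne b _ a 0 h0a hab (le_refl 0) (by omega)]
        exact hhead
    rw [ih (a + 1) n _ _ _ (by omega) (by omega) (by omega) hhead'
      (fun i hi1 hi2 => by rw [hrowNe i hi1 hi2]; exact hrows i (by omega) hi2)]
    rw [blankBoard_cons b a n m ham]
    rw [selBoard_cons gtest b a n m ham, selBoard_cons stest b a n m ham]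
    rw [selBoard_congr gtest _ b (a + 1) n m hrowNe, selBoard_congr stest _ b (a + 1) n m hrowNe]
    simp [List.append_assoc]

theorem B_outer (m : Int) (k : Nat) : ∀ (a n : Int) (b : List (List String)),
    n = (b.length : Int) → a + (k : Int) = n → 0 ≤ a → 0 ≤ m →
    (∀ i, a ≤ i → i < n → m ≤ ((rowOf b i).length : Int)) →
    (PySem.List.pyRange a n 1).foldl (fun b i => (PySem.List.pyRange 0 m 1).foldl (stepB i) b) b =
      blankBoard b a n m := by
  induction k with
  | zero =>
    intro a n b hn hk h0a h0m hrows
    have : a = n := by omega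
    subst this
    rw [PySem.List.pyRange_one_eq_nil (le_refl a), List.foldl_nil, blankBoard_nil]
  | succ k ih =>
    intro a n b hn hk h0a h0m hrows
    have ham : a < n := by omega
    have hab : a < (b.length : Int) := by omega
    rw [PySem.List.pyRange_one_cons ham, List.foldl_cons]
    rw [B_inner a m.toNat 0 m b (by omega) (le_refl 0) h0a (by omega) (hrows a (le_refl a) ham)]
    rw [ih (a + 1) n _ (by rw [PySem.List.length_pySetD]; exact hn) (by omega) (by omega) h0m
      (fun i hi1 hi2 => by
        rw [rowOf_set_ne b _ a i h0a hab (by omega) (by omega)]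
        exact hrows i (by omega) hi2)]
    rw [blankBoard_cons b a n m ham]
theorem stripBoard_unfold (board : List (List String)) :
    stripBoard board =
      (((PySem.List.pyRange 0 (board.length : Int) 1).foldl stepOutA (board, [], [])).1,
       PySem.Set.ofList (((PySem.List.pyRange 0 (board.length : Int) 1).foldl stepOutA (board, [], [])).2.1),
       PySem.Set.ofList (((PySem.List.pyRange 0 (board.length : Int) 1).foldl stepOutA (board, [], [])).2.2)) := rfl

theorem stripBoard_alt_unfold (board : List (List String)) :
    stripBoard_alt board =
      ((PySem.List.pyRange 0 (board.length : Int) 1).foldl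
         (fun b i => (PySem.List.pyRange 0 (if board.isEmpty then 0 else ((board.headD []).length : Int)) 1).foldl (stepB i) b) board,
       PySem.Set.ofList (selBoard gtest board 0 (board.length : Int) (if board.isEmpty then 0 else ((board.headD []).length : Int))),
       PySem.Set.ofList (selBoard stest board 0 (board.length : Int) (if board.isEmpty then 0 else ((board.headD []).length : Int)))) := rfl

theorem stripBoard_agrees (board : List (List String)) (hpre : Pre_stripBoard board) :
    stripBoard board = stripBoard_alt board := by
  cases board with
  | nil => rfl
  | cons r0 rest =>
    have hhead : ((rowOf (r0 :: rest) 0).length : Int) = ((r0.length : Nat) : Int) := by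
      unfold rowOf
      rw [PySem.List.pyGetD_zero_cons]
    have hrows : ∀ i, 0 ≤ i → i < (((r0 :: rest).length : Nat) : Int) →
        ((r0.length : Nat) : Int) ≤ ((rowOf (r0 :: rest) i).length : Int) := by
      intro i h1 h2
      have hmem : rowOf (r0 :: rest) i ∈ r0 :: rest := by
        unfold rowOf
        apply PySem.List.pyGetD_mem
        unfold PySem.Raise.InRange
        omega
      have := hpre _ hmem
      simp only [List.headD_cons] at this
      exact_mod_cast this
    rw [stripBoard_unfold, stripBoard_alt_unfold]
    rw [A_outer ((r0.length : Nat) : Int) (r0 :: rest).length 0 (((r0 :: rest).length : Nat) : Int)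
      (r0 :: rest) [] [] rfl (by omega) (le_refl 0) hhead hrows]
    simp only [List.isEmpty_cons, List.headD_cons, if_neg (by decide : ¬ (false = true))]
    rw [B_outer ((r0.length : Nat) : Int) (r0 :: rest).length 0 (((r0 :: rest).length : Nat) : Int)
      (r0 :: rest) rfl (by omega) (le_refl 0) (by positivity) hrows]
    simp

-- ===== VERDICT (by name: the statement is the Claim_ definition above) =====
theorem stripBoard_spec : Claim_equal_stripBoard := by
  intro board _ hpre
  unfold Spec_stripBoard
  exact stripBoard_agrees board hpre
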